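-- pv_equiv track=rewrite | github.com/langchain-ai/langchain | agents/seo_agent/tools/outreach_engine.py | _classify_outreach_type
-- ===== SOURCE A (Python) =====
-- def _classify_outreach_type(
--     title: str, url: str, preferred: list[str]
-- ) -> str:
--     """Classify the best outreach type based on the target article."""
--     title_lower = title.lower()
--     url_lower = url.lower()
--
--     if any(w in title_lower for w in ["tool", "resource", "list", "roundup", "best", "top"]):
--         return "inclusion" if "inclusion" in preferred else preferred[0] if preferred else "mention"
--     if any(w in title_lower for w in ["guest", "write for us", "contributor", "submit"]):
--         return "guestpost" if "guestpost" in preferred else preferred[0] if preferred else "mention"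
--     if any(w in url_lower for w in ["blog", "article", "post", "guide", "how-to"]):
--         return "mention" if "mention" in preferred else preferred[0] if preferred else "mention"
--
--     return preferred[0] if preferred else "mention"
-- ===== SOURCE B (Python) =====
-- PRIORITY = {"inclusion": 0, "guestpost": 1, "mention": 2}
--
-- KEYWORDS = {
--     "tool": ("title", "inclusion"), "resource": ("title", "inclusion"),
--     "list": ("title", "inclusion"), "roundup": ("title", "inclusion"),
--     "best": ("title", "inclusion"), "top": ("title", "inclusion"),
--     "guest": ("title", "guestpost"), "write for us": ("title", "guestpost"),
--     "contributor": ("title", "guestpost"), "submit": ("title", "guestpost"),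
--     "blog": ("url", "mention"), "article": ("url", "mention"),
--     "post": ("url", "mention"), "guide": ("url", "mention"),
--     "how-to": ("url", "mention"),
-- }
--
--
-- def _classify_outreach_type(
--     title: str, url: str, preferred: list[str]
-- ) -> str:
--     """Classify the best outreach type based on the target article."""
--     texts = {"title": title.lower(), "url": url.lower()}
--     best = None
--     for word, (src, cat) in KEYWORDS.items():
--         if word in texts[src] and (best is None or PRIORITY[cat] < PRIORITY[best]):
--             best = cat
--     if best is not None and best in preferred:
--         return best
--     return preferred[0] if preferred else "mention"
-- ===== Notes on version B (the rewrite author's own statement) =====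
-- stated objective: alternative
-- what changed: Replaced the ordered early-return branch chain by a single flat scan over one keyword-to-(source,category) map that keeps the minimum-priority matched category, then one shared preferred-list resolution at the end.
import Mathlib
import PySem

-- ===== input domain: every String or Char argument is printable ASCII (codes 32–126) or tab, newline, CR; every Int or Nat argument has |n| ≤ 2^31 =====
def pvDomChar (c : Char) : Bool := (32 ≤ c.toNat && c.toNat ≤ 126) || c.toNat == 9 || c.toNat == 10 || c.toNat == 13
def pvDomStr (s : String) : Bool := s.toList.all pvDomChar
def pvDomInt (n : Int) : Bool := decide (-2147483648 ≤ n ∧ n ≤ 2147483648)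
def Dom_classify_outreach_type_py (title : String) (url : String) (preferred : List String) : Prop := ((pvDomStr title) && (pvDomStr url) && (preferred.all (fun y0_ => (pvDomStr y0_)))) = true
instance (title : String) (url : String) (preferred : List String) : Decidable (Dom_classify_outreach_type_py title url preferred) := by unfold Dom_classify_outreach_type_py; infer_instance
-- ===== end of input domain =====

-- B replaces A's ordered early-return branch chain by a single flat scan over a keyword→(source,category)
-- map keeping the minimum-priority matched category (objective: alternative); same return value everywhere.

-- ===== PORT A =====
def classify_outreach_type_py (title : String) (url : String) (preferred : List String) : String :=
  let title_lower := PySem.Str.lower title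
  let url_lower := PySem.Str.lower url
  if ["tool", "resource", "list", "roundup", "best", "top"].any
      (fun w => PySem.Str.isIn w title_lower) then
    if preferred.contains "inclusion" then "inclusion"
    else match preferred with | [] => "mention" | p :: _ => p
  else if ["guest", "write for us", "contributor", "submit"].any
      (fun w => PySem.Str.isIn w title_lower) then
    if preferred.contains "guestpost" then "guestpost"
    else match preferred with | [] => "mention" | p :: _ => p
  else if ["blog", "article", "post", "guide", "how-to"].any
      (fun w => PySem.Str.isIn w url_lower) then
    if preferred.contains "mention" then "mention"
    else match preferred with | [] => "mention" | p :: _ => p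
  else
    match preferred with | [] => "mention" | p :: _ => p

-- ===== PORT B =====
-- PRIORITY dict of Source B, as a function (three fixed keys)
def pvPriority (c : String) : Nat :=
  if c = "inclusion" then 0 else if c = "guestpost" then 1 else 2

-- KEYWORDS dict of Source B in insertion order: (word, source, category)
def pvKeywords : List (String × String × String) :=
  [ ("tool", "title", "inclusion"), ("resource", "title", "inclusion"),
    ("list", "title", "inclusion"), ("roundup", "title", "inclusion"),
    ("best", "title", "inclusion"), ("top", "title", "inclusion"),
    ("guest", "title", "guestpost"), ("write for us", "title", "guestpost"),
    ("contributor", "title", "guestpost"), ("submit", "title", "guestpost"),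
    ("blog", "url", "mention"), ("article", "url", "mention"),
    ("post", "url", "mention"), ("guide", "url", "mention"),
    ("how-to", "url", "mention") ]

-- loop body of Source B: update `best` when the word occurs in its source text and the
-- category's priority beats the current best (None loses to everything)
def pvStep (tl ul : String) (best : Option String) (kv : String × String × String) : Option String :=
  if PySem.Str.isIn kv.1 (if kv.2.1 = "title" then tl else ul) &&
      (match best with | none => true | some b => decide (pvPriority kv.2.2 < pvPriority b)) then
    some kv.2.2
  else best

def classify_outreach_type_py_alt (title : String) (url : String) (preferred : List String) : String :=
  let tl := PySem.Str.lower title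
  let ul := PySem.Str.lower url
  let best := pvKeywords.foldl (pvStep tl ul) none
  match best with
  | some b => if preferred.contains b then b
              else match preferred with | [] => "mention" | p :: _ => p
  | none => match preferred with | [] => "mention" | p :: _ => p

-- ===== PRECONDITION & SPEC =====
def Spec_classify_outreach_type_py (title : String) (url : String) (preferred : List String) (out : String) : Prop := out = classify_outreach_type_py_alt title url preferred
instance (title : String) (url : String) (preferred : List String) (out : String) : Decidable (Spec_classify_outreach_type_py title url preferred out) := by unfold Spec_classify_outreach_type_py; infer_instance

-- ===== CLAIM (what is proved, stated in full; the proofs are below) =====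
def Claim_equal_classify_outreach_type_py : Prop := ∀ (title : String) (url : String) (preferred : List String), Dom_classify_outreach_type_py title url preferred → Spec_classify_outreach_type_py title url preferred (classify_outreach_type_py title url preferred)

-- ===== LEMMAS AND PROOFS =====

-- once `best` holds a category whose priority is ≤ every category in the block, the block keeps it
theorem pv_fold_keep (tl ul b c s : String) (h : ¬ pvPriority c < pvPriority b) (ws : List String) :
    (ws.map (fun w => (w, s, c))).foldl (pvStep tl ul) (some b) = some b := by
  induction ws with
  | nil => rfl
  | cons w ws ih => simp [pvStep, h, ih]

-- from `best = None`, a uniform block yields its category iff some word matches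
theorem pv_fold_none (tl ul c s : String) (ws : List String) :
    (ws.map (fun w => (w, s, c))).foldl (pvStep tl ul) none
      = if ws.any (fun w => PySem.Str.isIn w (if s = "title" then tl else ul)) then some c else none := by
  induction ws with
  | nil => rfl
  | cons w ws ih =>
    simp only [PySem.Str.isIn_eq] at ih ⊢
    cases hw : PySem.Chars.isIn w.toList (if s = "title" then tl else ul).toList with
    | true =>
      have hstep : pvStep tl ul none (w, s, c) = some c := by simp [pvStep, hw]
      simp only [List.map_cons, List.foldl_cons, hstep,
        pv_fold_keep tl ul c c s (lt_irrefl _)]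
      simp [hw]
    | false =>
      have hstep : pvStep tl ul none (w, s, c) = none := by simp [pvStep, hw]
      simp only [List.map_cons, List.foldl_cons, hstep, ih]
      simp [hw]

theorem pvKeywords_split : pvKeywords
    = (["tool", "resource", "list", "roundup", "best", "top"].map (fun w => (w, "title", "inclusion")))
      ++ (["guest", "write for us", "contributor", "submit"].map (fun w => (w, "title", "guestpost")))
      ++ (["blog", "article", "post", "guide", "how-to"].map (fun w => (w, "url", "mention"))) := by
  rfl

-- the flat minimum-priority scan equals the first matching block, in block order
theorem pv_best_eq (tl ul : String) :
    pvKeywords.foldl (pvStep tl ul) none =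
      if ["tool", "resource", "list", "roundup", "best", "top"].any (fun w => PySem.Str.isIn w tl) then
        some "inclusion"
      else if ["guest", "write for us", "contributor", "submit"].any (fun w => PySem.Str.isIn w tl) then
        some "guestpost"
      else if ["blog", "article", "post", "guide", "how-to"].any (fun w => PySem.Str.isIn w ul) then
        some "mention"
      else none := by
  have e1 : (if ("title" : String) = "title" then tl else ul) = tl := if_pos rfl
  have e2 : (if ("url" : String) = "title" then tl else ul) = ul := if_neg (by decide)
  rw [pvKeywords_split, List.foldl_append, List.foldl_append, pv_fold_none, e1]
  cases h1 : ["tool", "resource", "list", "roundup", "best", "top"].any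
      (fun w => PySem.Str.isIn w tl) with
  | true =>
    simp only [reduceIte]
    rw [pv_fold_keep _ _ "inclusion" "guestpost" "title" (by simp [pvPriority]),
        pv_fold_keep _ _ "inclusion" "mention" "url" (by simp [pvPriority])]
  | false =>
    simp only [Bool.false_eq_true, reduceIte]
    rw [pv_fold_none, e1]
    cases h2 : ["guest", "write for us", "contributor", "submit"].any
        (fun w => PySem.Str.isIn w tl) with
    | true =>
      simp only [reduceIte]
      rw [pv_fold_keep _ _ "guestpost" "mention" "url" (by simp [pvPriority])]
    | false =>
      simp only [Bool.false_eq_true, reduceIte]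
      rw [pv_fold_none, e2]

-- ===== VERDICT (by name: the statement is the Claim_ definition above) =====
theorem classify_outreach_type_py_spec : Claim_equal_classify_outreach_type_py := by
  intro title url preferred _
  unfold Spec_classify_outreach_type_py classify_outreach_type_py classify_outreach_type_py_alt
  dsimp only
  rw [pv_best_eq]
  cases h1 : ["tool", "resource", "list", "roundup", "best", "top"].any
      (fun w => PySem.Str.isIn w (PySem.Str.lower title)) <;>
  cases h2 : ["guest", "write for us", "contributor", "submit"].any
      (fun w => PySem.Str.isIn w (PySem.Str.lower title)) <;>
  cases h3 : ["blog", "article", "post", "guide", "how-to"].any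
      (fun w => PySem.Str.isIn w (PySem.Str.lower url)) <;>
  simp
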